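-- pv_equiv track=rewrite | github.com/asthagaur1/danfoss-bdd-automation | suites/SourceCode/lib/InputSheetParser/testInput.py | get_dict_using_given_key_as_arg1_and_values_as_arg2
-- ===== SOURCE A (Python) =====
-- def get_dict_using_given_key_as_arg1_and_values_as_arg2(app_details_dict, arg_key, arg_val):
--     """
--     Get dictionary from application details dictionary using keys as arg_key, arg_val.
--     :param app_details_dict: controller variant string.
--     :param arg_key:
--     :param arg_val:
--     :return: dictionary {arg_key:[}.
--     """
--     app_dict_code_num = dict.fromkeys((app_details_dict[arg_key]))
--     for key in app_dict_code_num.keys():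
--         app_dict_code_num[key] = list()
--
--     for index, key in enumerate(app_details_dict[arg_key]):
--         app_dict_code_num[key].append(app_details_dict[arg_val][index])
--
--     for key in app_dict_code_num.keys():
--         app_dict_code_num[key] = list(dict.fromkeys(app_dict_code_num[key]))
--
--     return app_dict_code_num
-- ===== SOURCE B (Python) =====
-- def get_dict_using_given_key_as_arg1_and_values_as_arg2(app_details_dict, arg_key, arg_val):
--     """Single pass: group and order-preserving-dedup in one loop."""
--     result = {}
--     for i, k in enumerate(app_details_dict[arg_key]):
--         bucket = result.setdefault(k, [])
--         v = app_details_dict[arg_val][i]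
--         if v not in bucket:
--             bucket.append(v)
--     return result
-- ===== Notes on version B (the rewrite author's own statement) =====
-- stated objective: simpler
-- what changed: Replaces A's three passes (dict.fromkeys init, grouping append pass, per-key dict.fromkeys dedup pass) by one loop that groups and dedups incrementally via setdefault and a membership test.
import Mathlib
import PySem

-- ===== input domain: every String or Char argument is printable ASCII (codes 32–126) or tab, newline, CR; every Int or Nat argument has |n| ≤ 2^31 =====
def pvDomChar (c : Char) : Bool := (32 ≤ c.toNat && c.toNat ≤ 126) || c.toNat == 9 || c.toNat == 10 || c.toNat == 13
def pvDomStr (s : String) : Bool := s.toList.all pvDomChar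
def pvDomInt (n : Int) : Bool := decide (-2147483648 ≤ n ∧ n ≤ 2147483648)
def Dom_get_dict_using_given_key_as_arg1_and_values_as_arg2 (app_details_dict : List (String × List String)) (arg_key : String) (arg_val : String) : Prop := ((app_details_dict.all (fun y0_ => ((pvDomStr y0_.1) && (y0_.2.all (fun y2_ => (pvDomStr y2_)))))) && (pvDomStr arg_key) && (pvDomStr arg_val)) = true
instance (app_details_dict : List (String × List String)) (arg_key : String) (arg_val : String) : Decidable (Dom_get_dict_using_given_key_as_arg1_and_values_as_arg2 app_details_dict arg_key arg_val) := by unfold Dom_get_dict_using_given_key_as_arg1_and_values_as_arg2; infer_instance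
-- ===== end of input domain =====

-- B replaces A's three passes (fromkeys init, grouping append pass, per-key dedup pass) by a single
-- loop that groups and dedups incrementally (setdefault + membership test); same result, proved equal.

-- ===== PORT A =====
def get_dict_using_given_key_as_arg1_and_values_as_arg2 (app_details_dict : List (String × List String)) (arg_key : String) (arg_val : String) : List (String × List String) :=
  -- app_details_dict[arg_key] / [arg_val]: Pre_ guarantees the keys are present where read (KeyError excluded)
  let ks := (PySem.Dict.mk app_details_dict).getD arg_key []
  let vs := (PySem.Dict.mk app_details_dict).getD arg_val []
  -- dict.fromkeys(ks) followed by the first loop that sets every value to list():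
  -- values are typed List String directly (the intermediate None values are never observed)
  let d0 : PySem.Dict String (List String) :=
    (PySem.List.dedup ks).foldl (fun d k => d.insert k []) PySem.Dict.empty
  -- second loop: for index, key in enumerate(ks): d[key].append(vs[index])
  -- (key is always present, so d[key].append is d.modify; vs[index] in range by Pre_)
  let d2 := (PySem.List.enumerate ks).foldl
    (fun d p => d.modify p.2 [] (· ++ [(PySem.List.pyGet? vs p.1).getD ""])) d0
  -- third loop: for key in d.keys(): d[key] = list(dict.fromkeys(d[key]))
  let d3 := d2.keys.foldl (fun d k => d.insert k (PySem.List.dedup (d.getD k []))) d2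
  d3.items

-- ===== PORT B =====
def get_dict_using_given_key_as_arg1_and_values_as_arg2_alt (app_details_dict : List (String × List String)) (arg_key : String) (arg_val : String) : List (String × List String) :=
  let ks := (PySem.Dict.mk app_details_dict).getD arg_key []
  ((PySem.List.enumerate ks).foldl
    (fun d p =>
      let d1 := d.setdefault p.2 ([] : List String)
      let bucket := d1.getD p.2 []
      let v := (PySem.List.pyGet? ((PySem.Dict.mk app_details_dict).getD arg_val []) p.1).getD ""
      if v ∈ bucket then d1 else d1.insert p.2 (bucket ++ [v]))
    PySem.Dict.empty).items

-- ===== PRECONDITION & SPEC =====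
-- Pre_ is exactly A's non-raising domain: arg_key must be a key (else KeyError), and when the key
-- list is non-empty, arg_val must be a key (else KeyError) with a value list at least as long
-- (else IndexError).
def Pre_get_dict_using_given_key_as_arg1_and_values_as_arg2 (app_details_dict : List (String × List String)) (arg_key : String) (arg_val : String) : Prop :=
  ((PySem.Dict.mk app_details_dict).get? arg_key).isSome = true ∧
  ((PySem.Dict.mk app_details_dict).getD arg_key [] = [] ∨
    (((PySem.Dict.mk app_details_dict).get? arg_val).isSome = true ∧
      ((PySem.Dict.mk app_details_dict).getD arg_key []).length ≤
        ((PySem.Dict.mk app_details_dict).getD arg_val []).length))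
instance (app_details_dict : List (String × List String)) (arg_key : String) (arg_val : String) : Decidable (Pre_get_dict_using_given_key_as_arg1_and_values_as_arg2 app_details_dict arg_key arg_val) := by unfold Pre_get_dict_using_given_key_as_arg1_and_values_as_arg2; infer_instance

def pvWitness_get_dict_using_given_key_as_arg1_and_values_as_arg2 : (List (String × List String)) × String × String :=
  ([("k", ["a", "b", "a"]), ("v", ["1", "2", "3"])], "k", "v")

def Spec_get_dict_using_given_key_as_arg1_and_values_as_arg2 (app_details_dict : List (String × List String)) (arg_key : String) (arg_val : String) (out : List (String × List String)) : Prop := out = get_dict_using_given_key_as_arg1_and_values_as_arg2_alt app_details_dict arg_key arg_val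
instance (app_details_dict : List (String × List String)) (arg_key : String) (arg_val : String) (out : List (String × List String)) : Decidable (Spec_get_dict_using_given_key_as_arg1_and_values_as_arg2 app_details_dict arg_key arg_val out) := by unfold Spec_get_dict_using_given_key_as_arg1_and_values_as_arg2; infer_instance

-- ===== CLAIM (what is proved, stated in full; the proofs are below) =====
def Claim_equal_get_dict_using_given_key_as_arg1_and_values_as_arg2 : Prop := ∀ (app_details_dict : List (String × List String)) (arg_key : String) (arg_val : String), Dom_get_dict_using_given_key_as_arg1_and_values_as_arg2 app_details_dict arg_key arg_val → Pre_get_dict_using_given_key_as_arg1_and_values_as_arg2 app_details_dict arg_key arg_val → Spec_get_dict_using_given_key_as_arg1_and_values_as_arg2 app_details_dict arg_key arg_val (get_dict_using_given_key_as_arg1_and_values_as_arg2 app_details_dict arg_key arg_val)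

-- ===== LEMMAS AND PROOFS =====

-- order-preserving dedup continued from an accumulator (proof-only helper)
def pvDedupFrom (acc : List String) (vs : List String) : List String :=
  vs.foldl (fun a v => if v ∈ a then a else a ++ [v]) acc

-- folding over enumerate ks while indexing vs = folding over ks.zip vs (generic in the loop body)
theorem pv_foldl_enumerate_zip {D : Type} (F : D → String → String → D) (vs : List String) :
    ∀ (ks : List String) (s : ℕ) (d : D), s + ks.length ≤ vs.length →
    (PySem.List.enumerate ks (s : Int)).foldl
        (fun d p => F d p.2 ((PySem.List.pyGet? vs p.1).getD "")) d
      = (ks.zip (vs.drop s)).foldl (fun d q => F d q.1 q.2) d := by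
  intro ks
  induction ks with
  | nil => intro s d h; simp [PySem.List.enumerate_nil]
  | cons k t ih =>
      intro s d h
      have hs : s < vs.length := by simp at h; omega
      rw [PySem.List.enumerate_cons]
      simp only [List.foldl_cons]
      have hg : (PySem.List.pyGet? vs (s : Int)).getD "" = vs[s] := by
        rw [PySem.List.pyGet?_natCast, List.getElem?_eq_getElem hs]; rfl
      have hdrop : vs.drop s = vs[s] :: vs.drop (s + 1) := List.drop_eq_getElem_cons hs
      rw [hg, hdrop]
      simp only [List.zip_cons_cons, List.foldl_cons]
      have hcast : ((s : Int) + 1) = (((s + 1 : ℕ)) : Int) := by push_cast; ring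
      rw [hcast]
      exact ih (s + 1) (F d k vs[s]) (by simp at h ⊢; omega)

theorem pv_getD_init (l : List String) :
    ∀ (d : PySem.Dict String (List String)), (∀ c, d.getD c [] = []) →
    ∀ (c : String), (l.foldl (fun d k => d.insert k ([] : List String)) d).getD c [] = [] := by
  induction l with
  | nil => intro d h c; exact h c
  | cons k t ih =>
      intro d h c
      simp only [List.foldl_cons]
      refine ih _ (fun c' => ?_) c
      rw [PySem.Dict.getD_insert]
      split <;> simp [h]

theorem pv_getD_dedup_fold (l : List String) :
    ∀ (d : PySem.Dict String (List String)) (c : String), l.Nodup →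
    (l.foldl (fun d k => d.insert k (PySem.List.dedup (d.getD k []))) d).getD c []
      = if c ∈ l then PySem.List.dedup (d.getD c []) else d.getD c [] := by
  induction l with
  | nil => simp
  | cons k t ih =>
      intro d c hnd
      simp only [List.foldl_cons]
      rw [ih _ c (List.nodup_cons.mp hnd).2]
      by_cases hck : c = k
      · subst hck
        have hct : c ∉ t := (List.nodup_cons.mp hnd).1
        rw [if_neg hct, PySem.Dict.getD_insert]
        simp
      · rw [PySem.Dict.getD_insert_of_ne _ _ _ hck]
        simp [List.mem_cons, hck]

theorem pv_set_update_self (s : PySem.Set String) (l : List String)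
    (h : ∀ x ∈ l, x ∈ s) : PySem.Set.update s l = s := by
  rw [PySem.Set.update_eq_append_filter]
  have hfil : List.filter (fun y => !s.contains y) (PySem.Set.ofList l) = [] := by
    apply List.filter_eq_nil_iff.mpr
    intro x hx
    have hm : x ∈ s := h x ((PySem.Set.mem_ofList l x).mp hx)
    simpa using hm
  rw [hfil, List.append_nil]

-- B's loop step
def pvBStep (d : PySem.Dict String (List String)) (q : String × String) : PySem.Dict String (List String) :=
  if q.2 ∈ (d.setdefault q.1 ([] : List String)).getD q.1 []
  then d.setdefault q.1 ([] : List String)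
  else (d.setdefault q.1 ([] : List String)).insert q.1
    ((d.setdefault q.1 ([] : List String)).getD q.1 [] ++ [q.2])

theorem pv_bstep_getD (d : PySem.Dict String (List String)) (q : String × String) (c : String) :
    (pvBStep d q).getD c []
      = if q.1 = c then
          (if q.2 ∈ d.getD c [] then d.getD c [] else d.getD c [] ++ [q.2])
        else d.getD c [] := by
  unfold pvBStep
  by_cases hqc : q.1 = c
  · subst hqc
    rw [if_pos rfl]
    have hb : (d.setdefault q.1 ([] : List String)).getD q.1 [] = d.getD q.1 [] :=
      PySem.Dict.getD_setdefault_self d q.1 [] []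
    rw [hb]
    split
    · rw [hb]
    · rw [PySem.Dict.getD_insert]
      simp
  · rw [if_neg hqc]
    have hne : c ≠ q.1 := fun h => hqc h.symm
    have hsd : (d.setdefault q.1 ([] : List String)).getD c [] = d.getD c [] := by
      rw [PySem.Dict.getD_eq_get?_getD, PySem.Dict.get?_setdefault_of_ne _ _ hne,
        ← PySem.Dict.getD_eq_get?_getD]
    split
    · exact hsd
    · rw [PySem.Dict.getD_insert_of_ne _ _ _ hne, hsd]

theorem pv_bstep_keys (d : PySem.Dict String (List String)) (q : String × String) :
    (pvBStep d q).keys = PySem.Set.add d.keys q.1 := by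
  unfold pvBStep
  by_cases hc : d.contains q.1 = true
  · have hmem : q.1 ∈ d.keys := (PySem.Dict.contains_iff_mem_keys d q.1).mp hc
    rw [PySem.Dict.setdefault_of_contains d _ hc, PySem.Set.add_of_mem hmem]
    split
    · rfl
    · exact PySem.Dict.keys_insert_of_contains d _ hc
  · have hc' : d.contains q.1 = false := by simpa using hc
    have hnm : q.1 ∉ d.keys := fun hm => by
      simp [(PySem.Dict.contains_iff_mem_keys d q.1).mpr hm] at hc'
    rw [PySem.Dict.setdefault_of_not_contains d _ hc', PySem.Set.add_of_not_mem hnm]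
    have hbkt : ((d.insert q.1 ([] : List String)).getD q.1 []) = [] := by
      rw [PySem.Dict.getD_insert]; simp
    rw [hbkt]
    split
    · simp_all
    · have hcc : (d.insert q.1 ([] : List String)).contains q.1 = true :=
        PySem.Dict.contains_insert_self d q.1 []
      rw [PySem.Dict.keys_insert_of_contains _ _ hcc,
        PySem.Dict.keys_insert_of_not_contains d _ hc']

theorem pv_b_keys (P : List (String × String)) :
    ∀ (d : PySem.Dict String (List String)),
    (P.foldl pvBStep d).keys = PySem.Set.update d.keys (P.map (·.1)) := by
  induction P with
  | nil => intro d; rfl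
  | cons q t ih =>
      intro d
      simp only [List.foldl_cons, List.map_cons]
      rw [ih, pv_bstep_keys, PySem.Set.update_cons]

theorem pv_b_getD (P : List (String × String)) :
    ∀ (d : PySem.Dict String (List String)) (c : String),
    (P.foldl pvBStep d).getD c []
      = pvDedupFrom (d.getD c []) ((P.filter (fun q => q.1 == c)).map (·.2)) := by
  induction P with
  | nil => intro d c; rfl
  | cons q t ih =>
      intro d c
      simp only [List.foldl_cons, List.filter_cons]
      rw [ih, pv_bstep_getD]
      by_cases hqc : q.1 = c
      · have hb : (q.1 == c) = true := by simpa using hqc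
        simp only [hb, if_pos hqc, if_true, List.map_cons]
        rfl
      · have hb : (q.1 == c) = false := by simpa using hqc
        simp only [hb, if_neg hqc, Bool.false_eq_true, if_false]

theorem pv_dedupFrom_nil (vs : List String) : pvDedupFrom [] vs = PySem.List.dedup vs := by
  have hfun : (fun (a : List String) (v : String) => if v ∈ a then a else a ++ [v])
      = PySem.Set.add := by
    funext a v
    rw [PySem.Set.add_eq_ite]
  simp only [pvDedupFrom, hfun, PySem.List.dedup_eq_ofList, PySem.Set.ofList_eq_foldl]

-- A's pipeline, named for the proof (definitionally the port's lets)
def pvD0 (ks : List String) : PySem.Dict String (List String) :=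
  (PySem.List.dedup ks).foldl (fun d k => d.insert k []) PySem.Dict.empty

def pvD2 (ks vs : List String) : PySem.Dict String (List String) :=
  (PySem.List.enumerate ks).foldl
    (fun d p => d.modify p.2 [] (· ++ [(PySem.List.pyGet? vs p.1).getD ""])) (pvD0 ks)

def pvD3 (ks vs : List String) : PySem.Dict String (List String) :=
  (pvD2 ks vs).keys.foldl (fun d k => d.insert k (PySem.List.dedup (d.getD k []))) (pvD2 ks vs)

def pvB (ks vs : List String) : PySem.Dict String (List String) :=
  (PySem.List.enumerate ks).foldl
    (fun d p => pvBStep d (p.2, (PySem.List.pyGet? vs p.1).getD "")) PySem.Dict.empty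

theorem pvA_eq (a : List (String × List String)) (k v : String) :
    get_dict_using_given_key_as_arg1_and_values_as_arg2 a k v
      = (pvD3 ((PySem.Dict.mk a).getD k []) ((PySem.Dict.mk a).getD v [])).items := rfl

theorem pvB_eq (a : List (String × List String)) (k v : String) :
    get_dict_using_given_key_as_arg1_and_values_as_arg2_alt a k v
      = (pvB ((PySem.Dict.mk a).getD k []) ((PySem.Dict.mk a).getD v [])).items := rfl

theorem pv_AB (ks vs : List String) (h : ks.length ≤ vs.length) :
    (pvD3 ks vs).items = (pvB ks vs).items := by
  have hQfst : (ks.zip vs).map Prod.fst = ks := List.map_fst_zip h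
  have hk0 : (pvD0 ks).keys = PySem.List.dedup ks := by
    unfold pvD0
    rw [PySem.Dict.keys_foldl_insert, PySem.Dict.keys_empty, PySem.Set.update_nil_left,
      PySem.List.dedup_eq_ofList, PySem.Set.ofList_ofList, ← PySem.List.dedup_eq_ofList]
  have hg0 : ∀ c, (pvD0 ks).getD c [] = [] := by
    intro c
    exact pv_getD_init _ _ (fun c' => PySem.Dict.getD_empty c' []) c
  have hd2 : pvD2 ks vs = (ks.zip vs).foldl (fun d q => d.modify q.1 [] (· ++ [q.2])) (pvD0 ks) := by
    unfold pvD2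
    have := pv_foldl_enumerate_zip (fun d k v => d.modify k [] (· ++ [v])) vs ks 0 (pvD0 ks)
      (by simpa using h)
    simpa using this
  have hk2 : (pvD2 ks vs).keys = PySem.List.dedup ks := by
    rw [hd2, PySem.Dict.keys_foldl_modify_key, hk0, hQfst]
    exact pv_set_update_self _ _ (fun x hx => (PySem.List.mem_dedup ks x).mpr hx)
  have hg2 : ∀ c, (pvD2 ks vs).getD c []
      = ((ks.zip vs).filter (fun q => q.1 == c)).map (·.2) := by
    intro c
    rw [hd2, PySem.Dict.getD_foldl_modify_append, hg0]
    simp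
  have hk3 : (pvD3 ks vs).keys = PySem.List.dedup ks := by
    unfold pvD3
    rw [PySem.Dict.keys_foldl_insert, hk2]
    exact pv_set_update_self _ _ (fun x hx => hx)
  have hg3 : ∀ c ∈ PySem.List.dedup ks,
      (pvD3 ks vs).getD c [] = PySem.List.dedup ((pvD2 ks vs).getD c []) := by
    intro c hc
    unfold pvD3
    rw [pv_getD_dedup_fold _ _ _ (by rw [hk2]; exact PySem.List.nodup_dedup ks), hk2, if_pos hc]
  have hb : pvB ks vs = (ks.zip vs).foldl pvBStep PySem.Dict.empty := by
    unfold pvB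
    have := pv_foldl_enumerate_zip (fun d k v => pvBStep d (k, v)) vs ks 0 PySem.Dict.empty
      (by simpa using h)
    simpa using this
  have hkB : (pvB ks vs).keys = PySem.List.dedup ks := by
    rw [hb, pv_b_keys, PySem.Dict.keys_empty, PySem.Set.update_nil_left]
    have hm : (ks.zip vs).map (fun q => q.1) = ks := hQfst
    rw [hm, ← PySem.List.dedup_eq_ofList]
  have hgB : ∀ c, (pvB ks vs).getD c []
      = PySem.List.dedup (((ks.zip vs).filter (fun q => q.1 == c)).map (·.2)) := by
    intro c
    rw [hb, pv_b_getD, PySem.Dict.getD_empty, pv_dedupFrom_nil]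
  rw [PySem.Dict.items_eq_map_keys _ (by rw [hk3]; exact PySem.List.nodup_dedup ks) ([] : List String),
    PySem.Dict.items_eq_map_keys _ (by rw [hkB]; exact PySem.List.nodup_dedup ks) ([] : List String),
    hk3, hkB]
  apply List.map_congr_left
  intro c hc
  rw [hg3 c hc, hg2 c, hgB c]

-- ===== VERDICT (by name: the statement is the Claim_ definition above) =====
theorem get_dict_using_given_key_as_arg1_and_values_as_arg2_spec : Claim_equal_get_dict_using_given_key_as_arg1_and_values_as_arg2 := by
  intro a arg_key arg_val _ hpre
  have h : ((PySem.Dict.mk a).getD arg_key []).length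
      ≤ ((PySem.Dict.mk a).getD arg_val []).length := by
    rcases hpre.2 with h0 | ⟨_, hl⟩
    · simp [h0]
    · exact hl
  unfold Spec_get_dict_using_given_key_as_arg1_and_values_as_arg2
  exact (pvA_eq a arg_key arg_val).trans
    ((pv_AB _ _ h).trans (pvB_eq a arg_key arg_val).symm)
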